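-- pv_equiv track=rewrite | github.com/tristan-muzzy/manual_shuffle | src.py | binary_search_weight
-- ===== SOURCE A (Python) =====
-- def binary_search_weight(cumulative_weights, target):
--     """
--     Find the leftmost index where cumulative_weights[index] > target
--     """
--     left = 0
--     right = len(cumulative_weights)
--     while left < right:
--         mid = (left + right) // 2
--
--         if cumulative_weights[mid] > target:
--             right = mid  # Could be the answer, keep searching left
--         else:
--             left = mid + 1  # Target is bigger, search right
--
--     return left
-- ===== SOURCE B (Python) =====
-- def binary_search_weight(cumulative_weights, target):
--     """
--     Find the leftmost index where cumulative_weights[index] > target.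
--     Slice-based search: keep the current sublist and the count of elements
--     discarded on its left, instead of a pair of index bounds.
--     """
--     seg = cumulative_weights
--     offset = 0
--     while seg:
--         mid = len(seg) // 2
--         if seg[mid] > target:
--             seg = seg[:mid]
--         else:
--             offset += mid + 1
--             seg = seg[mid + 1:]
--     return offset
-- ===== Notes on version B (the rewrite author's own statement) =====
-- stated objective: alternative
-- what changed: A's index-bound while-loop (left/right ints) is replaced by a slice-based search that maintains the current sublist itself plus an offset count of elements discarded on the left, shrinking the list with seg[:mid] / seg[mid+1:]
import Mathlib
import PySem

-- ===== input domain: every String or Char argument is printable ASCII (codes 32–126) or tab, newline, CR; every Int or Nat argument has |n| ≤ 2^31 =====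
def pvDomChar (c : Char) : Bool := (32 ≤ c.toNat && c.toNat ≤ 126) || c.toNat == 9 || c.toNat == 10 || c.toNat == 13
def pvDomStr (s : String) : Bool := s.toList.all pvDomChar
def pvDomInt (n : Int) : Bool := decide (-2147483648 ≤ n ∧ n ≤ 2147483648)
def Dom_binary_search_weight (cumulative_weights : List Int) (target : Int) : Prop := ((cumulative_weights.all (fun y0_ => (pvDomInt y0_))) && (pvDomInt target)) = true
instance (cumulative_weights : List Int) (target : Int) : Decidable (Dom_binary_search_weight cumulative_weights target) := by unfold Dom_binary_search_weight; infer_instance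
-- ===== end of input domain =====

-- B replaces A's index-bound loop by a slice-based search carrying the current sublist and a left-discard offset (objective: alternative decomposition).

-- ===== PORT A =====
-- the while-loop of A, state (left, right); fuel is a totality device only:
-- each iteration shrinks right - left by at least 1, so length + 1 fuel always suffices
def bswLoop (cumulative_weights : List Int) (target : Int) : Nat → Int → Int → Int
  | 0, left, _ => left
  | fuel + 1, left, right =>
    if left < right then
      let mid := PySem.Int.floordiv (left + right) 2
      if (PySem.List.pyGet? cumulative_weights mid).getD 0 > target then
        bswLoop cumulative_weights target fuel left mid
      else
        bswLoop cumulative_weights target fuel (mid + 1) right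
    else
      left

def binary_search_weight (cumulative_weights : List Int) (target : Int) : Int :=
  bswLoop cumulative_weights target (cumulative_weights.length + 1) 0 ((cumulative_weights.length : Int))

-- ===== PORT B =====
-- the while-loop of B, state (seg, offset): seg is the remaining sublist, offset counts
-- the elements discarded to its left; seg[:mid] and seg[mid+1:] are ported as take/drop
-- (exact for these nonnegative in-range bounds); fuel is a totality device only
def bswSeg (target : Int) : Nat → List Int → Int → Int
  | 0, _, offset => offset
  | fuel + 1, seg, offset =>
    if seg.isEmpty then
      offset
    else
      let mid := seg.length / 2
      if (PySem.List.pyGet? seg (mid : Int)).getD 0 > target then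
        bswSeg target fuel (seg.take mid) offset
      else
        bswSeg target fuel (seg.drop (mid + 1)) (offset + (mid : Int) + 1)

def binary_search_weight_alt (cumulative_weights : List Int) (target : Int) : Int :=
  bswSeg target (cumulative_weights.length + 1) cumulative_weights 0

-- ===== PRECONDITION & SPEC =====
def Spec_binary_search_weight (cumulative_weights : List Int) (target : Int) (out : Int) : Prop := out = binary_search_weight_alt cumulative_weights target
instance (cumulative_weights : List Int) (target : Int) (out : Int) : Decidable (Spec_binary_search_weight cumulative_weights target out) := by unfold Spec_binary_search_weight; infer_instance

-- ===== CLAIM (what is proved, stated in full; the proofs are below) =====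
def Claim_equal_binary_search_weight : Prop := ∀ (cumulative_weights : List Int) (target : Int), Dom_binary_search_weight cumulative_weights target → Spec_binary_search_weight cumulative_weights target (binary_search_weight cumulative_weights target)

-- ===== LEMMAS AND PROOFS =====
-- invariant: A's interval [left, right) corresponds to B's state
-- (seg = (drop left).take (right-left), offset = left); induction on the shared fuel
theorem bswLoop_eq_bswSeg (cumulative_weights : List Int) (target : Int) :
    ∀ (fuel : Nat) (left right : Int), 0 ≤ left → left ≤ right →
      right ≤ (cumulative_weights.length : Int) → (right - left).toNat ≤ fuel →
      bswLoop cumulative_weights target fuel left right =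
        bswSeg target fuel ((cumulative_weights.drop left.toNat).take (right - left).toNat) left := by
  intro fuel
  induction fuel with
  | zero => intro left right h0 hlr hrl hn; rfl
  | succ n ih =>
    intro left right h0 hlr hrl hn
    by_cases hlt : left < right
    · set L := left.toNat with hL
      set w := (right - left).toNat with hw
      have hwpos : 0 < w := by omega
      have hlen : ((cumulative_weights.drop L).take w).length = w := by
        simp only [List.length_take, List.length_drop]; omega
      have hmid : PySem.Int.floordiv (left + right) 2 = left + ((w / 2 : Nat) : Int) := by
        rw [PySem.Int.floordiv_eq_ediv_of_pos (by omega)]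
        omega
      have hms : (w / 2) < w := Nat.div_lt_self hwpos (by omega)
      have hne : ¬ ((cumulative_weights.drop L).take w).isEmpty := by
        rw [Bool.not_eq_true, List.isEmpty_eq_false_iff, ← List.length_pos_iff, hlen]
        omega
      have hcast : left + ((w / 2 : Nat) : Int) = (((L + w / 2 : Nat)) : Int) := by omega
      -- the two probes read the same element
      have hget : PySem.List.pyGet? cumulative_weights (left + ((w / 2 : Nat) : Int)) =
          PySem.List.pyGet? ((cumulative_weights.drop L).take w) ((w / 2 : Nat) : Int) := by
        rw [hcast, PySem.List.pyGet?_natCast, PySem.List.pyGet?_natCast,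
          List.getElem?_eq_getElem (by omega),
          List.getElem?_eq_getElem (by rw [hlen]; exact hms)]
        rw [List.getElem_take, List.getElem_drop]
      -- unfold one step on both sides
      rw [bswLoop, bswSeg, if_pos hlt, if_neg hne]
      simp only [hlen, hmid, hget]
      split_ifs with hc
      · -- left half: B keeps seg.take (w/2)
        rw [ih left (left + ((w / 2 : Nat) : Int)) h0 (by omega) (by omega) (by omega)]
        have h1 : ((left + ((w / 2 : Nat) : Int)) - left).toNat = w / 2 := by omega
        rw [h1, List.take_take, Nat.min_eq_left hms.le]
      · -- right half: B keeps seg.drop (w/2+1), offset becomes left + w/2 + 1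
        rw [ih (left + ((w / 2 : Nat) : Int) + 1) right (by omega) (by omega) hrl (by omega)]
        have h1 : (left + ((w / 2 : Nat) : Int) + 1).toNat = w / 2 + 1 + L := by omega
        have h2 : (right - (left + ((w / 2 : Nat) : Int) + 1)).toNat = w - (w / 2 + 1) := by omega
        rw [h1, h2, List.drop_take, List.drop_drop, Nat.add_comm (w / 2 + 1) L]
    · have heq : right = left := by omega
      rw [bswLoop, bswSeg]
      simp [heq]

-- ===== VERDICT (by name: the statement is the Claim_ definition above) =====
theorem binary_search_weight_spec : Claim_equal_binary_search_weight := by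
  intro cumulative_weights target _
  unfold Spec_binary_search_weight binary_search_weight binary_search_weight_alt
  rw [bswLoop_eq_bswSeg cumulative_weights target (cumulative_weights.length + 1)
      0 ((cumulative_weights.length : Int)) le_rfl (by omega) le_rfl (by omega)]
  simp
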